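-- pv_equiv track=rewrite | github.com/mmarcos05/Guia3conMartu | Marqui/python/parcial.py | ap_antes_corte
-- ===== SOURCE A (Python) =====
-- def ap_antes_corte(c:str, s:str) -> int:
--     apariciones = 0
--     for char in s:
--         if char == 'x':
--             return apariciones
--         if char == c:
--             apariciones += 1
--     return apariciones
-- ===== SOURCE B (Python) =====
-- def ap_antes_corte(c: str, s: str) -> int:
--     idx = s.find('x')
--     prefix = s[:idx] if idx != -1 else s
--     return sum(1 for ch in prefix if ch == c)
-- ===== Notes on version B (the rewrite author's own statement) =====
-- stated objective: alternative
-- what changed: Replaces A's fused early-return scan with a two-pass locate-then-count decomposition: first find the cut point with s.find('x'), slice the prefix, then count matching characters in that slice.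
import Mathlib
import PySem

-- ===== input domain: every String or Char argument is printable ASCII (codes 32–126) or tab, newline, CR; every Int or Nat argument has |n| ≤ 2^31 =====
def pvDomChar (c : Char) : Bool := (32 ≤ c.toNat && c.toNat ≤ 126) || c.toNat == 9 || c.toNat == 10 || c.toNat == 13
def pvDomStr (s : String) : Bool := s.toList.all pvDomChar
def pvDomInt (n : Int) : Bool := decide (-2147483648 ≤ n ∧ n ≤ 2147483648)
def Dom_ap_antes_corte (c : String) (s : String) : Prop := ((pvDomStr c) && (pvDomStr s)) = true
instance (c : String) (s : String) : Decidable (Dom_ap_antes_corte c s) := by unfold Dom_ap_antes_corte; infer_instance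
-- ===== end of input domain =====

-- B replaces A's fused early-return scan by a two-pass locate-then-count decomposition
-- (find the first 'x', slice the prefix, count matches in the slice); same cost, no speed claim.

-- ===== PORT A =====
-- the for-loop with its early return, as structural recursion over the characters
def apAntesLoop (c : String) : List Char → Int → Int
  | [], acc => acc
  | ch :: t, acc =>
    if ch == 'x' then acc
    else if String.ofList [ch] == c then apAntesLoop c t (acc + 1)
    else apAntesLoop c t acc

def ap_antes_corte (c : String) (s : String) : Int := apAntesLoop c s.toList 0

-- ===== PORT B =====
def ap_antes_corte_alt (c : String) (s : String) : Int :=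
  let idx := PySem.Str.find s "x"
  let pre := if idx ≠ -1 then PySem.Str.slice s none (some idx) else s
  pre.toList.foldl (fun acc ch => if String.ofList [ch] == c then acc + 1 else acc) 0

-- ===== PRECONDITION & SPEC =====
def Spec_ap_antes_corte (c : String) (s : String) (out : Int) : Prop := out = ap_antes_corte_alt c s
instance (c : String) (s : String) (out : Int) : Decidable (Spec_ap_antes_corte c s out) := by unfold Spec_ap_antes_corte; infer_instance

-- ===== CLAIM (what is proved, stated in full; the proofs are below) =====
def Claim_equal_ap_antes_corte : Prop := ∀ (c : String) (s : String), Dom_ap_antes_corte c s → Spec_ap_antes_corte c s (ap_antes_corte c s)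

-- ===== LEMMAS AND PROOFS =====

-- A's loop counts the matches in the longest 'x'-free prefix
theorem apAntesLoop_eq_countP (c : String) (l : List Char) (a : Int) :
    apAntesLoop c l a = a + ((l.takeWhile (fun ch => ch != 'x')).countP (fun ch => String.ofList [ch] == c) : Int) := by
  induction l generalizing a with
  | nil => simp [apAntesLoop]
  | cons ch t ih =>
    by_cases hx : ch == 'x'
    · simp [apAntesLoop, hx, bne]
    · have hbne : (ch != 'x') = true := by simpa [bne] using hx
      by_cases hc : String.ofList [ch] == c
      · simp [apAntesLoop, hx, hc, hbne, ih]
        ring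
      · simp [apAntesLoop, hx, hc, hbne, ih]

theorem singleton_prefix_iff {α : Type} (a : α) (t : List α) : [a] <+: t ↔ t.head? = some a := by
  cases t with
  | nil => simp
  | cons b u => simp [List.cons_prefix_cons, eq_comm]

theorem takeWhile_eq_self_of_not_mem (l : List Char) (h : ∀ i : Nat, l[i]? ≠ some 'x') :
    l.takeWhile (fun ch => ch != 'x') = l := by
  induction l with
  | nil => rfl
  | cons ch t ih =>
    have h0 := h 0
    simp at h0
    have hbne : (ch != 'x') = true := by simpa [bne] using h0
    rw [List.takeWhile_cons, if_pos hbne]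
    exact congrArg (ch :: ·) (ih (fun i => by have := h (i + 1); simpa using this))

theorem take_eq_takeWhile (l : List Char) (n : Nat)
    (hlt : ∀ i : Nat, i < n → l[i]? ≠ some 'x') (hn : l[n]? = some 'x') :
    l.take n = l.takeWhile (fun ch => ch != 'x') := by
  induction l generalizing n with
  | nil => simp at hn
  | cons ch t ih =>
    cases n with
    | zero =>
      simp at hn
      simp [hn]
    | succ m =>
      have h0 := hlt 0 (Nat.succ_pos m)
      simp at h0
      have hbne : (ch != 'x') = true := by simpa [bne] using h0
      simp [hbne]
      exact ih m (fun i hi => by have := hlt (i + 1) (by omega); simpa using this)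
        (by simpa using hn)

-- B's prefix is exactly the longest 'x'-free prefix
theorem prefix_eq_takeWhile (s : String) :
    (if PySem.Str.find s "x" ≠ -1 then PySem.Str.slice s none (some (PySem.Str.find s "x")) else s).toList
      = s.toList.takeWhile (fun ch => ch != 'x') := by
  by_cases h : PySem.Str.find s "x" = -1
  · rw [if_neg (fun hc => hc h)]
    have hinf : ¬ (['x'] <:+: s.toList) := (PySem.Chars.find_eq_neg_one_iff s.toList ['x']).mp h
    refine (takeWhile_eq_self_of_not_mem s.toList ?_).symm
    intro i hi
    apply hinf
    have hdrop : ['x'] <+: s.toList.drop i := by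
      rw [singleton_prefix_iff]
      simpa [List.head?_drop] using hi
    exact hdrop.isInfix.trans (List.drop_suffix i s.toList).isInfix
  · rw [if_pos h]
    have hfind : PySem.Str.find s "x" = PySem.Chars.find s.toList ['x'] := rfl
    have hnonneg : 0 ≤ PySem.Chars.find s.toList ['x'] := by
      have h1 := PySem.Chars.neg_one_le_find (s := s.toList) (sub := ['x'])
      rw [hfind] at h
      omega
    obtain ⟨hpre, hmin⟩ := PySem.Chars.find_spec (s := s.toList) (sub := ['x']) hnonneg
    rw [hfind]
    have hslice : (PySem.Str.slice s none (some (PySem.Chars.find s.toList ['x']))).toList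
        = s.toList.take (PySem.Chars.find s.toList ['x']).toNat := by
      simp [PySem.Str.slice, PySem.Chars.slice_eq_listSlice, PySem.List.slice_to _ hnonneg]
    rw [hslice]
    apply take_eq_takeWhile
    · intro i hi hsome
      apply hmin i hi
      rw [singleton_prefix_iff]
      simpa [List.head?_drop] using hsome
    · have := (singleton_prefix_iff 'x' (s.toList.drop (PySem.Chars.find s.toList ['x']).toNat)).mp hpre
      simpa [List.head?_drop] using this

-- ===== VERDICT (by name: the statement is the Claim_ definition above) =====
theorem ap_antes_corte_spec : Claim_equal_ap_antes_corte := by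
  intro c s _
  unfold Spec_ap_antes_corte ap_antes_corte ap_antes_corte_alt
  rw [apAntesLoop_eq_countP]
  rw [PySem.List.foldl_if_add_one]
  simp only [prefix_eq_takeWhile]
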